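-- pv_equiv track=rewrite | github.com/fraven01/NOESIS-2 | crawler/fetcher.py | _mime_matches_whitelist
-- ===== SOURCE A (Python) =====
-- from typing import Dict, Mapping, Optional, Sequence, Tuple
--
-- def _mime_matches_whitelist(content_type: str, whitelist: Sequence[str]) -> bool:
--     for allowed in whitelist:
--         if not allowed:
--             continue
--         if allowed.endswith("/*"):
--             prefix = allowed[:-1]
--             if content_type.startswith(prefix):
--                 return True
--         elif content_type == allowed:
--             return True
--     return False
-- ===== SOURCE B (Python) =====
-- def _mime_matches_whitelist(content_type, whitelist):
--     # Invert the match: derive from content_type the full set of whitelist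
--     # entries that could accept it (itself, plus one wildcard pattern per '/'),
--     # then simply test that candidate set against the whitelist.
--     candidates = {content_type[:i + 1] + "*" for i, ch in enumerate(content_type) if ch == "/"}
--     if content_type:
--         candidates.add(content_type)
--     return not candidates.isdisjoint(whitelist)
-- ===== Notes on version B (the rewrite author's own statement) =====
-- stated objective: alternative
-- what changed: B inverts the matching direction: instead of scanning the whitelist and testing each entry against content_type (exact match or '/*'-wildcard prefix), it derives from content_type alone the complete finite set of whitelist entries that could accept it (content_type itself plus one 'prefix*' pattern per '/' in it) and returns whether that candidate set intersects the whitelist; the per-entry endswith/startswith logic disappears.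
import Mathlib
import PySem

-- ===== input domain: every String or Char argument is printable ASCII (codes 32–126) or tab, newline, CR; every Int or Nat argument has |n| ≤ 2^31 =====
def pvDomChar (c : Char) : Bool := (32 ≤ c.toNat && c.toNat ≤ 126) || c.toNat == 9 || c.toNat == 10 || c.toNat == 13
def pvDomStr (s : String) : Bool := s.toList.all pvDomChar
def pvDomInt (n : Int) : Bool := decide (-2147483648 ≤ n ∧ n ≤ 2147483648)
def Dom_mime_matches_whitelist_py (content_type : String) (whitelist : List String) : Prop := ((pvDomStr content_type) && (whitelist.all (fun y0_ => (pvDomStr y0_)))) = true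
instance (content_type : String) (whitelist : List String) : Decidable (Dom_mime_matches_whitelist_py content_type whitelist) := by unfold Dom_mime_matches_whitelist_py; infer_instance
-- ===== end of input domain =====

-- B inverts the matching direction: instead of testing each whitelist entry against
-- content_type (exact / '/*'-wildcard), it derives from content_type the full set of
-- entries that could accept it and intersects that with the whitelist (objective: alternative).


-- ===== PORT A =====
-- the for-loop with early return, entry by entry
def mimeLoopA (content_type : String) : List String → Bool
  | [] => false
  | allowed :: rest =>
    if allowed = "" then mimeLoopA content_type rest
    else if PySem.Str.endswith allowed "/*" then
      if PySem.Str.startswith content_type (PySem.Str.slice allowed none (some (-1))) then true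
      else mimeLoopA content_type rest
    else if content_type = allowed then true
    else mimeLoopA content_type rest

def mime_matches_whitelist_py (content_type : String) (whitelist : List String) : Bool :=
  mimeLoopA content_type whitelist

-- ===== PORT B =====
-- the set comprehension: one candidate content_type[:i+1] + "*" per '/' at index i
-- (the slice bound i+1 is a nonnegative Python int; '+ "*"' is ported as list append + String.ofList)
def mimeStepB (cs : List Char) (s : PySem.Set String) (p : Int × Char) : PySem.Set String :=
  if p.2 = '/' then
    PySem.Set.add s (String.ofList (PySem.List.slice cs none (some (p.1 + 1)) ++ ['*']))
  else s

def mimeCandB (content_type : String) : PySem.Set String :=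
  let base := (PySem.List.enumerate content_type.toList 0).foldl
    (mimeStepB content_type.toList) PySem.Set.empty
  if content_type = "" then base else PySem.Set.add base content_type

def mime_matches_whitelist_py_alt (content_type : String) (whitelist : List String) : Bool :=
  !(PySem.Set.isdisjoint (mimeCandB content_type) whitelist)

-- ===== PRECONDITION & SPEC =====
def Spec_mime_matches_whitelist_py (content_type : String) (whitelist : List String) (out : Bool) : Prop := out = mime_matches_whitelist_py_alt content_type whitelist
instance (content_type : String) (whitelist : List String) (out : Bool) : Decidable (Spec_mime_matches_whitelist_py content_type whitelist out) := by unfold Spec_mime_matches_whitelist_py; infer_instance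

-- ===== CLAIM (what is proved, stated in full; the proofs are below) =====
def Claim_equal_mime_matches_whitelist_py : Prop := ∀ (content_type : String) (whitelist : List String), Dom_mime_matches_whitelist_py content_type whitelist → Spec_mime_matches_whitelist_py content_type whitelist (mime_matches_whitelist_py content_type whitelist)

-- ===== LEMMAS AND PROOFS =====

-- A's per-entry test, as a boolean predicate
def mimeCondA (content_type allowed : String) : Bool :=
  if allowed = "" then false
  else if PySem.Str.endswith allowed "/*" then
    PySem.Str.startswith content_type (PySem.Str.slice allowed none (some (-1)))
  else decide (content_type = allowed)

theorem mimeLoopA_eq_any (ct : String) (wl : List String) :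
    mimeLoopA ct wl = wl.any (mimeCondA ct) := by
  induction wl with
  | nil => rfl
  | cons a rest ih =>
    simp only [mimeLoopA, mimeCondA, List.any_cons]
    split_ifs <;> simp_all

-- membership in the candidate-set fold, generalized over the enumeration start
theorem mem_foldB (cs : List Char) (l : List Char) (k : Nat) (s : PySem.Set String) (w : String) :
    w ∈ (PySem.List.enumerate l (k : Int)).foldl (mimeStepB cs) s ↔
      w ∈ s ∨ ∃ j, ∃ h : j < l.length, l[j] = '/' ∧
        w = String.ofList (cs.take (k + j + 1) ++ ['*']) := by
  induction l generalizing k s with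
  | nil => simp [PySem.List.enumerate]
  | cons x xs ih =>
    rw [PySem.List.enumerate_cons, List.foldl_cons]
    have hk1 : (k : Int) + 1 = ((k + 1 : Nat) : Int) := by push_cast; ring
    rw [hk1, ih]
    by_cases hx : x = '/'
    · simp only [mimeStepB, hx, reduceIte]
      have : PySem.List.slice cs none (some ((k : Int) + 1))
          = cs.take (k + 1) := by
        rw [hk1, PySem.List.slice_to_natCast]
      rw [this, PySem.Set.mem_add]
      constructor
      · rintro (⟨hs | hw⟩ | ⟨j, hj, hc, hw⟩)
        · exact Or.inl hs
        · exact Or.inr ⟨0, by simp, by simp, by simpa [Nat.add_comm] using hw⟩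
        · exact Or.inr ⟨j + 1, by simp only [List.length_cons]; omega, hc, by rw [hw]; congr 3; omega⟩
      · rintro (hs | ⟨j, hj, hc, hw⟩)
        · exact Or.inl (Or.inl hs)
        · cases j with
          | zero => exact Or.inl (Or.inr (by simpa [Nat.add_comm] using hw))
          | succ j =>
            refine Or.inr ⟨j, by simp only [List.length_cons] at hj; omega, by simpa using hc, ?_⟩
            rw [hw]; congr 3; omega
    · simp only [mimeStepB, if_neg hx]
      constructor
      · rintro (hs | ⟨j, hj, hc, hw⟩)
        · exact Or.inl hs
        · exact Or.inr ⟨j + 1, by simp only [List.length_cons]; omega, hc, by rw [hw]; congr 3; omega⟩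
      · rintro (hs | ⟨j, hj, hc, hw⟩)
        · exact Or.inl hs
        · cases j with
          | zero => exact absurd (by simpa using hc) hx
          | succ j =>
            refine Or.inr ⟨j, by simp only [List.length_cons] at hj; omega, by simpa using hc, ?_⟩
            rw [hw]; congr 3; omega

theorem mem_mimeCandB (ct w : String) :
    w ∈ mimeCandB ct ↔
      (ct ≠ "" ∧ w = ct) ∨ ∃ j, ∃ h : j < ct.toList.length, ct.toList[j] = '/' ∧
        w = String.ofList (ct.toList.take (j + 1) ++ ['*']) := by
  unfold mimeCandB
  have hbase := mem_foldB ct.toList ct.toList 0 PySem.Set.empty w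
  simp only [Nat.cast_zero, Nat.zero_add] at hbase
  by_cases hct : ct = ""
  · simp only [if_pos hct]
    rw [hbase]
    simp [PySem.Set.empty, hct]
  · simp only [if_neg hct]
    rw [PySem.Set.mem_add, hbase]
    simp only [PySem.Set.empty, List.not_mem_nil, false_or]
    constructor
    · rintro (h | h)
      · exact Or.inr h
      · exact Or.inl ⟨hct, h⟩
    · rintro (⟨_, h⟩ | h)
      · exact Or.inr h
      · exact Or.inl h

-- A's per-entry test accepts exactly the candidate strings B derives from content_type
theorem mimeCondA_iff_mem (ct a : String) :
    mimeCondA ct a = true ↔ a ∈ mimeCandB ct := by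
  rw [mem_mimeCandB]
  unfold mimeCondA
  by_cases ha : a = ""
  · simp only [if_pos ha]
    constructor
    · intro h; simp at h
    · rintro (⟨hct, hw⟩ | ⟨j, hj, hc, hw⟩)
      · exact absurd (ha ▸ hw.symm) hct
      · exact absurd (congrArg String.toList (ha ▸ hw)) (by simp)
  · rw [if_neg ha]
    by_cases hew : PySem.Str.endswith a "/*" = true
    · rw [if_pos hew]
      have hsuf : ['/', '*'] <:+ a.toList := by
        have := (PySem.Chars.endswith_iff a.toList "/*".toList).mp (by simpa using hew)
        simpa using this
      obtain ⟨u, hu⟩ := hsuf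
      have hslice : (PySem.Str.slice a none (some (-1))).toList = u ++ ['/'] := by
        rw [PySem.Str.toList_slice, PySem.Chars.slice_eq_listSlice,
          PySem.List.slice_to_neg_one, ← hu]
        have h2 : u ++ ['/', '*'] = (u ++ ['/']) ++ ['*'] := by simp
        rw [h2, List.dropLast_concat]
      constructor
      · intro hsw
        rw [PySem.Str.startswith_eq, PySem.Chars.startswith_iff, hslice] at hsw
        obtain ⟨t, ht⟩ := hsw
        have hteq : ct.toList = (u ++ ['/']) ++ t := ht.symm
        refine Or.inr ⟨u.length, by rw [hteq]; simp, ?_, ?_⟩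
        · rw [List.getElem_of_eq hteq (by rw [hteq]; simp),
            List.getElem_append_left (by simp)]
          exact List.getElem_concat_length rfl (by simp)
        · have htake : ct.toList.take (u.length + 1) = u ++ ['/'] := by
            rw [hteq]
            exact List.take_left' (by simp)
          rw [htake]
          have h3 : (u ++ ['/']) ++ ['*'] = a.toList := by
            rw [List.append_assoc]
            exact hu
          rw [h3, String.ofList_toList]
      · rintro (⟨hct, hw⟩ | ⟨j, hj, hc, hw⟩)
        · rw [PySem.Str.startswith_eq, PySem.Chars.startswith_iff, hslice, ← hw]
          have h4 : u ++ ['/'] <+: u ++ ['/', '*'] := ⟨['*'], by simp⟩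
          rwa [hu] at h4
        · have has : a.toList = ct.toList.take (j + 1) ++ ['*'] := by
            rw [hw, String.toList_ofList]
          rw [PySem.Str.startswith_eq, PySem.Chars.startswith_iff, PySem.Str.toList_slice,
            PySem.Chars.slice_eq_listSlice, PySem.List.slice_to_neg_one, has,
            List.dropLast_concat]
          exact List.take_prefix _ _
    · rw [if_neg hew]
      constructor
      · intro h
        have hca := of_decide_eq_true h
        exact Or.inl ⟨fun h0 => ha (by rw [← hca]; exact h0), hca.symm⟩
      · rintro (⟨hct, hw⟩ | ⟨j, hj, hc, hw⟩)
        · simp [hw]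
        · exfalso
          apply hew
          rw [PySem.Str.endswith_eq, PySem.Chars.endswith_iff]
          have htake : ct.toList.take (j + 1) = ct.toList.take j ++ ['/'] := by
            rw [List.take_add_one, List.getElem?_eq_getElem hj, hc]; rfl
          have has : a.toList = ct.toList.take j ++ ['/', '*'] := by
            rw [hw, String.toList_ofList, htake]; simp
          rw [has]
          exact ⟨ct.toList.take j, rfl⟩

-- ===== VERDICT (by name: the statement is the Claim_ definition above) =====
theorem mime_matches_whitelist_py_spec : Claim_equal_mime_matches_whitelist_py := by
  intro ct wl _
  unfold Spec_mime_matches_whitelist_py mime_matches_whitelist_py mime_matches_whitelist_py_alt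
  rw [mimeLoopA_eq_any]
  rw [Bool.eq_iff_iff]
  simp only [PySem.Set.isdisjoint, Bool.not_not, List.any_eq_true]
  constructor
  · rintro ⟨a, ha, hc⟩
    exact ⟨a, (mimeCondA_iff_mem ct a).mp hc, by simp [ha]⟩
  · rintro ⟨c, hc, hin⟩
    exact ⟨c, by simpa using hin, (mimeCondA_iff_mem ct c).mpr hc⟩
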